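-- pv_equiv track=rewrite | github.com/lulucelia/SdConv | eval.py | get_labels
-- ===== SOURCE A (Python) =====
-- import itertools
--
-- def get_labels(frame_wise_labels):
--     labels = []
--
--     tmp = [0]
--     count = 0
--     for key, group in itertools.groupby(frame_wise_labels):
--         action_len = len(list(group))
--         tmp.append(tmp[count] + action_len)
--         count += 1
--         labels.append(key)
--     starts = tmp[:-1]
--     ends = tmp[1:]
--
--     return labels, starts, ends
-- ===== SOURCE B (Python) =====
-- def get_labels(frame_wise_labels):
--     if not frame_wise_labels:
--         return [], [], []
--     labels, starts, ends = [], [], []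
--     prev = frame_wise_labels[0]
--     start = 0
--     for i, x in enumerate(frame_wise_labels[1:], 1):
--         if x != prev:
--             labels.append(prev)
--             starts.append(start)
--             ends.append(i)
--             prev = x
--             start = i
--     labels.append(prev)
--     starts.append(start)
--     ends.append(len(frame_wise_labels))
--     return labels, starts, ends
-- ===== Notes on version B (the rewrite author's own statement) =====
-- stated objective: alternative
-- what changed: Replaced itertools.groupby plus a cumulative-length list with a single transition scan that tracks the previous label and the run's start index and appends each completed segment directly.
import Mathlib
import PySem

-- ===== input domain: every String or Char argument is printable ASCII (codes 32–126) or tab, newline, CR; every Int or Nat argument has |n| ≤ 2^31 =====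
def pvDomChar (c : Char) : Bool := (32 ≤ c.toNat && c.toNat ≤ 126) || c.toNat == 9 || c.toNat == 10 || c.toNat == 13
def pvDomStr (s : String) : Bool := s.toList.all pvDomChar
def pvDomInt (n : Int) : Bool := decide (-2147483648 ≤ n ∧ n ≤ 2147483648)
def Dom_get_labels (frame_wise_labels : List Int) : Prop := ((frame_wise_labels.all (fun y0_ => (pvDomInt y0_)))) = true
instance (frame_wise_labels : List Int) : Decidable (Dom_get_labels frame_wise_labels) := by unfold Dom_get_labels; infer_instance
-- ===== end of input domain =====

-- B replaces itertools.groupby plus a cumulative-length list by a single transition scan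
-- (track previous label and run start, flush on change); objective: alternative decomposition, same O(n).

-- ===== PORT A =====
-- itertools.groupby (no key): one (key, run-length) pair per maximal run of equal elements.
def spanRun (k : Int) : List Int → Nat × List Int
  | [] => (0, [])
  | x :: xs => if x = k then ((spanRun k xs).1 + 1, (spanRun k xs).2) else (0, x :: xs)

theorem spanRun_length_le (k : Int) : ∀ t : List Int, (spanRun k t).2.length ≤ t.length
  | [] => le_refl _
  | x :: xs => by
    simp only [spanRun]
    split
    · exact le_trans (spanRun_length_le k xs) (Nat.le_succ _)
    · exact le_refl _

def groupA : List Int → List (Int × Nat)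
  | [] => []
  | x :: xs => (x, (spanRun x xs).1 + 1) :: groupA (spanRun x xs).2
termination_by l => l.length
decreasing_by
  have := spanRun_length_le x xs; simp; omega

-- the loop body: labels.append(key); tmp.append(tmp[count] + action_len); count += 1
def stepA (s : List Int × List Int × Int) (kg : Int × Nat) : List Int × List Int × Int :=
  (s.1 ++ [kg.1], s.2.1 ++ [PySem.List.pyGetD s.2.1 s.2.2 0 + (kg.2 : Int)], s.2.2 + 1)

def get_labels (frame_wise_labels : List Int) : List Int × List Int × List Int :=
  let st := (groupA frame_wise_labels).foldl stepA ([], [0], 0)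
  (st.1, PySem.List.slice st.2.1 none (some (-1)), PySem.List.slice st.2.1 (some 1) none)

-- ===== PORT B =====
-- transition scan: state (labels, starts, ends, prev, start, i)
def altStep (s : List Int × List Int × List Int × Int × Int × Int) (x : Int) :
    List Int × List Int × List Int × Int × Int × Int :=
  if x ≠ s.2.2.2.1 then
    (s.1 ++ [s.2.2.2.1], s.2.1 ++ [s.2.2.2.2.1], s.2.2.1 ++ [s.2.2.2.2.2], x, s.2.2.2.2.2, s.2.2.2.2.2 + 1)
  else
    (s.1, s.2.1, s.2.2.1, s.2.2.2.1, s.2.2.2.2.1, s.2.2.2.2.2 + 1)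

def get_labels_alt (frame_wise_labels : List Int) : List Int × List Int × List Int :=
  match frame_wise_labels with
  | [] => ([], [], [])
  | h :: t =>
    let s := t.foldl altStep ([], [], [], h, 0, 1)
    (s.1 ++ [s.2.2.2.1], s.2.1 ++ [s.2.2.2.2.1], s.2.2.1 ++ [((h :: t).length : Int)])

-- ===== PRECONDITION & SPEC =====
def Spec_get_labels (frame_wise_labels : List Int) (out : List Int × List Int × List Int) : Prop := out = get_labels_alt frame_wise_labels
instance (frame_wise_labels : List Int) (out : List Int × List Int × List Int) : Decidable (Spec_get_labels frame_wise_labels out) := by unfold Spec_get_labels; infer_instance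

-- ===== CLAIM (what is proved, stated in full; the proofs are below) =====
def Claim_equal_get_labels : Prop := ∀ (frame_wise_labels : List Int), Dom_get_labels frame_wise_labels → Spec_get_labels frame_wise_labels (get_labels frame_wise_labels)

-- ===== LEMMAS AND PROOFS =====

-- canonical segment decomposition both ports compute
def seg (prev st i : Int) : List Int → List Int × List Int × List Int
  | [] => ([prev], [st], [i])
  | x :: xs =>
    if x ≠ prev then
      ((seg x i (i + 1) xs).1.cons prev, ((seg x i (i + 1) xs).2.1).cons st, ((seg x i (i + 1) xs).2.2).cons i)
    else seg prev st (i + 1) xs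

-- cumulative segment ends of a group list starting at offset b
def sums (b : Int) : List (Int × Nat) → List Int
  | [] => []
  | (_, n) :: gs => (b + (n : Int)) :: sums (b + (n : Int)) gs

-- A-style output of a group list starting at offset b
def cum (b : Int) : List (Int × Nat) → List Int × List Int × List Int
  | [] => ([], [], [])
  | (k, n) :: gs =>
    ((cum (b + (n : Int)) gs).1.cons k, ((cum (b + (n : Int)) gs).2.1).cons b,
     ((cum (b + (n : Int)) gs).2.2).cons (b + (n : Int)))

theorem seg_run_nil (h b : Int) : ∀ (t : List Int) (i : Int) (n : Nat),
    spanRun h t = (n, []) → seg h b i t = ([h], [b], [i + (n : Int)])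
  | [], i, n => by
    intro hs
    simp only [spanRun, Prod.mk.injEq] at hs
    simp [seg, ← hs.1]
  | x :: xs, i, n => by
    intro hs
    simp only [spanRun] at hs
    by_cases hx : x = h
    · subst hx
      rw [if_pos rfl, Prod.mk.injEq] at hs
      obtain ⟨h1, h2⟩ := hs
      have ih := seg_run_nil x b xs (i + 1) (spanRun x xs).1 (by rw [← h2])
      simp only [seg, ne_eq, not_true_eq_false, ite_false]
      rw [ih]
      have : i + 1 + ((spanRun x xs).1 : Int) = i + (n : Int) := by rw [← h1]; push_cast; ring
      rw [this]
    · rw [if_neg hx, Prod.mk.injEq] at hs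
      exact absurd hs.2 (by simp)

theorem seg_run_cons (h b : Int) : ∀ (t : List Int) (i : Int) (n : Nat) (y : Int) (ys : List Int),
    spanRun h t = (n, y :: ys) →
    seg h b i t = ((seg y (i + n) (i + n + 1) ys).1.cons h,
                   ((seg y (i + n) (i + n + 1) ys).2.1).cons b,
                   ((seg y (i + n) (i + n + 1) ys).2.2).cons (i + n))
  | [], i, n, y, ys => by
    intro hs
    simp only [spanRun, Prod.mk.injEq] at hs
    exact absurd hs.2 (by simp)
  | x :: xs, i, n, y, ys => by
    intro hs
    simp only [spanRun] at hs
    by_cases hx : x = h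
    · subst hx
      rw [if_pos rfl, Prod.mk.injEq] at hs
      obtain ⟨h1, h2⟩ := hs
      have ih := seg_run_cons x b xs (i + 1) (spanRun x xs).1 y ys (by rw [← h2])
      simp only [seg, ne_eq, not_true_eq_false, ite_false]
      rw [ih]
      have harith : i + 1 + ((spanRun x xs).1 : Int) = i + (n : Int) := by rw [← h1]; push_cast; ring
      rw [harith]
    · rw [if_neg hx, Prod.mk.injEq] at hs
      obtain ⟨h1, h2⟩ := hs
      obtain ⟨rfl, rfl⟩ : x = y ∧ xs = ys := by
        cases h2; exact ⟨rfl, rfl⟩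
      simp only [seg, ne_eq, hx, not_false_eq_true, if_pos]
      rw [← h1]
      norm_num

theorem seg_eq_cum (t : List Int) (h b : Int) : seg h b (b + 1) t = cum b (groupA (h :: t)) := by
  rcases hs : spanRun h t with ⟨n, r⟩
  rw [groupA, hs]
  match r with
  | [] =>
    rw [seg_run_nil h b t (b + 1) n hs]
    simp only [groupA, cum, Prod.mk.injEq, List.cons.injEq, and_true, true_and]
    push_cast; ring
  | y :: ys =>
    have hlen : ys.length < t.length := by
      have := spanRun_length_le h t
      rw [hs] at this; simp at this; omega
    rw [seg_run_cons h b t (b + 1) n y ys hs]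
    have ih := seg_eq_cum ys y (b + 1 + (n : Int))
    simp only [cum]
    have harith2 : b + (((n + 1 : Nat)) : Int) = b + 1 + (n : Int) := by push_cast; ring
    rw [harith2, ← ih]
termination_by t.length
decreasing_by exact hlen

theorem cum_char : ∀ (gs : List (Int × Nat)) (b : Int),
    cum b gs = (gs.map Prod.fst, (b :: sums b gs).dropLast, sums b gs)
  | [], b => by simp [cum, sums]
  | (k, n) :: gs, b => by
    rw [cum, cum_char gs (b + (n : Int))]
    simp only [sums, List.map_cons, Prod.mk.injEq, true_and]
    exact ⟨by rw [List.dropLast_cons₂], trivial⟩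

theorem foldA : ∀ (gs : List (Int × Nat)) (ls tmp : List Int) (hne : tmp ≠ []),
    gs.foldl stepA (ls, tmp, (tmp.length : Int) - 1)
      = (ls ++ gs.map Prod.fst, tmp ++ sums (tmp.getLast hne) gs, (tmp.length : Int) - 1 + gs.length)
  | [], ls, tmp, hne => by simp [sums]
  | (k, n) :: gs, ls, tmp, hne => by
    have hlen : 0 < tmp.length := List.length_pos_iff.mpr hne
    have htn : (((tmp.length : Int) - 1)).toNat = tmp.length - 1 := by omega
    have hget : PySem.List.pyGetD tmp ((tmp.length : Int) - 1) 0 = tmp.getLast hne := by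
      rw [PySem.List.pyGetD_eq_getElem tmp 0 (by omega) (by omega)]
      simp [htn, List.getLast_eq_getElem]
    rw [List.foldl_cons]
    rw [show stepA (ls, tmp, (tmp.length : Int) - 1) (k, n)
        = (ls ++ [k], tmp ++ [tmp.getLast hne + (n : Int)], (tmp.length : Int) - 1 + 1) from by
      simp [stepA, hget]]
    have hne' : tmp ++ [tmp.getLast hne + (n : Int)] ≠ [] := by simp
    have hcnt : (tmp.length : Int) - 1 + 1 = ((tmp ++ [tmp.getLast hne + (n : Int)]).length : Int) - 1 := by
      simp
    rw [hcnt, foldA gs (ls ++ [k]) _ hne']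
    simp only [Prod.mk.injEq]
    refine ⟨by simp, ?_, by simp⟩
    rw [List.getLast_concat]
    simp [sums]

theorem foldB : ∀ (xs : List Int) (ls ss es : List Int) (prev st i : Int),
    (let r := xs.foldl altStep (ls, ss, es, prev, st, i)
     (r.1 ++ [r.2.2.2.1], r.2.1 ++ [r.2.2.2.2.1], r.2.2.1 ++ [i + (xs.length : Int)]))
      = (ls ++ (seg prev st i xs).1, ss ++ (seg prev st i xs).2.1, es ++ (seg prev st i xs).2.2)
  | [], ls, ss, es, prev, st, i => by simp [seg]
  | x :: xs, ls, ss, es, prev, st, i => by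
    simp only [List.foldl_cons]
    have harith : i + ((x :: xs).length : Int) = i + 1 + (xs.length : Int) := by
      simp; omega
    by_cases hx : x = prev
    · rw [show altStep (ls, ss, es, prev, st, i) x = (ls, ss, es, prev, st, i + 1) from by
        simp [altStep, hx]]
      have ih := foldB xs ls ss es prev st (i + 1)
      simp only at ih ⊢
      rw [harith, ih]
      simp only [seg, hx, ne_eq, not_true_eq_false, ite_false]
    · rw [show altStep (ls, ss, es, prev, st, i) x
          = (ls ++ [prev], ss ++ [st], es ++ [i], x, i, i + 1) from by
        simp [altStep, hx]]
      have ih := foldB xs (ls ++ [prev]) (ss ++ [st]) (es ++ [i]) x i (i + 1)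
      simp only at ih ⊢
      rw [harith, ih]
      simp only [seg, ne_eq, hx, not_false_eq_true, if_pos]
      simp [List.append_assoc]

-- ===== VERDICT (by name: the statement is the Claim_ definition above) =====
theorem get_labels_spec : Claim_equal_get_labels := by
  intro l _
  unfold Spec_get_labels
  match l with
  | [] =>
    simp [get_labels, get_labels_alt, groupA, PySem.List.slice_to_neg_one, PySem.List.slice_from_one]
  | h :: t =>
    unfold get_labels
    have h0 : ((([] : List Int), ([0] : List Int), (0 : Int)))
        = (([] : List Int), ([0] : List Int), ((([0] : List Int)).length : Int) - 1) := by
      norm_num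
    rw [h0, foldA (groupA (h :: t)) [] [0] (by simp)]
    have hlast : ([0] : List Int).getLast (by simp) = 0 := rfl
    rw [hlast]
    simp only [List.nil_append, List.singleton_append]
    rw [PySem.List.slice_to_neg_one, PySem.List.slice_from_one]
    have hA : (((groupA (h :: t)).map Prod.fst,
        ((0 : Int) :: sums 0 (groupA (h :: t))).dropLast,
        ((0 : Int) :: sums 0 (groupA (h :: t))).tail) : List Int × List Int × List Int)
        = seg h 0 1 t := by
      rw [List.tail_cons, ← cum_char, ← seg_eq_cum t h 0]
      norm_num
    rw [hA]
    unfold get_labels_alt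
    have ih := foldB t [] [] [] h 0 1
    simp only at ih
    have hlen : (((h :: t).length : Nat) : Int) = 1 + (t.length : Int) := by
      simp; omega
    simp only [hlen, ih, List.nil_append]
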